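-- pv_equiv track=rewrite | github.com/StoyanStoyanov1/Python-Fundamental | second_way/list_advanced/exercises/office_chairs.py | office_chairs
-- ===== SOURCE A (Python) =====
-- def office_chairs(current_rooms, current_chairs):
--     free_chairs = 0
--     result = []
--     index = 0
--     for room in range(1, current_rooms + 1):
--         count_chairs = len(current_chairs[index][0])
--         needed_chairs = int(current_chairs[index][1])
--         if count_chairs > needed_chairs:
--             free_chairs += count_chairs - needed_chairs
--
--         elif count_chairs < needed_chairs:
--             more_chairs = needed_chairs - count_chairs
--             result.append(f"{more_chairs} more chairs needed in room {room}")
--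
--         index += 1
--     if result:
--         return "\n".join(result)
--     else:
--         return f"Game On, {free_chairs} free chairs left"
-- ===== SOURCE B (Python) =====
-- def office_chairs(current_rooms, current_chairs):
--     report = ""
--     free_chairs = 0
--     room = current_rooms
--     while room >= 1:
--         chairs, taken = current_chairs[room - 1]
--         delta = len(chairs) - int(taken)
--         if delta < 0:
--             line = f"{-delta} more chairs needed in room {room}"
--             report = line + "\n" + report if report else line
--         elif delta > 0:
--             free_chairs += delta
--         room -= 1
--     if report:
--         return report
--     return f"Game On, {free_chairs} free chairs left"
-- ===== Notes on version B (the rewrite author's own statement) =====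
-- stated objective: alternative
-- what changed: Replaces A's forward pass that accumulates a message list plus a separate index and joins it at the end by a backward while-loop from the last room down to room 1 that builds the report string directly back-to-front by prepending, never materialising a message list or calling join.
import Mathlib
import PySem

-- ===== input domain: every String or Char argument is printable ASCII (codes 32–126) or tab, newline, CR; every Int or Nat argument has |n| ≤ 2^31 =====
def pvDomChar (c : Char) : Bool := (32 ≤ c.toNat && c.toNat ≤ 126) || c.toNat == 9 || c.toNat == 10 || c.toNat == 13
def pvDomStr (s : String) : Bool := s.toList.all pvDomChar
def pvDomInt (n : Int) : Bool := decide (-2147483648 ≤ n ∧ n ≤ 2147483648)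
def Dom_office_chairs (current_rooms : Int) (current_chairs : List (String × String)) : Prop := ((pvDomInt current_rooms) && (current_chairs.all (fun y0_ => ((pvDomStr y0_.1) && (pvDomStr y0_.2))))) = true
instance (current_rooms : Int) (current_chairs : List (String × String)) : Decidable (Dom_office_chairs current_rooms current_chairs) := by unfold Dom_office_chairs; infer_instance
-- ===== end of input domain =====

-- B replaces A's forward pass (message list + index + final join) by a backward
-- while-loop from the last room down to room 1 that builds the report string
-- directly back-to-front by prepending; same cost, different construction.

-- ===== PORT A =====
-- A's for-loop as structural recursion over the range list, carrying (free_chairs, result, index);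
-- 'none' is exactly where Python raises (IndexError / ValueError), excluded by Pre_.
def officeChairsLoopA (current_chairs : List (String × String)) :
    List Int → Int → List String → Int → Option (Int × List String × Int)
  | [], free_chairs, result, index => some (free_chairs, result, index)
  | room :: rest, free_chairs, result, index =>
    match PySem.List.pyGet? current_chairs index with
    | none => none
    | some pair =>
      let count_chairs : Int := PySem.Str.len pair.1
      match PySem.Int.ofStr? pair.2 with
      | none => none
      | some needed_chairs =>
        if count_chairs > needed_chairs then
          officeChairsLoopA current_chairs rest (free_chairs + (count_chairs - needed_chairs)) result (index + 1)
        else if count_chairs < needed_chairs then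
          officeChairsLoopA current_chairs rest free_chairs
            (result ++ [PySem.Int.toStr (needed_chairs - count_chairs) ++ " more chairs needed in room " ++ PySem.Int.toStr room]) (index + 1)
        else
          officeChairsLoopA current_chairs rest free_chairs result (index + 1)

def office_chairs (current_rooms : Int) (current_chairs : List (String × String)) : String :=
  match officeChairsLoopA current_chairs (PySem.List.pyRange 1 (current_rooms + 1) 1) 0 [] 0 with
  | none => ""   -- unreachable under Pre_: the Python raises here
  | some (free_chairs, result, _) =>
    if result ≠ [] then PySem.Str.join "\n" result
    else "Game On, " ++ PySem.Int.toStr free_chairs ++ " free chairs left"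

-- ===== PORT B =====
-- B's backward while-loop, carrying (report, free_chairs), room counting down to 1;
-- 'none' is exactly where Python raises (IndexError / ValueError), excluded by Pre_.
def officeChairsLoopB (current_chairs : List (String × String)) (room : Int)
    (report : String) (free_chairs : Int) : Option (String × Int) :=
  if _h : 1 ≤ room then
    match PySem.List.pyGet? current_chairs (room - 1) with
    | none => none
    | some pair =>
      match PySem.Int.ofStr? pair.2 with
      | none => none
      | some taken =>
        let delta := PySem.Str.len pair.1 - taken
        if delta < 0 then
          let line := PySem.Int.toStr (-delta) ++ " more chairs needed in room " ++ PySem.Int.toStr room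
          officeChairsLoopB current_chairs (room - 1)
            (if report ≠ "" then line ++ "\n" ++ report else line) free_chairs
        else if delta > 0 then
          officeChairsLoopB current_chairs (room - 1) report (free_chairs + delta)
        else
          officeChairsLoopB current_chairs (room - 1) report free_chairs
  else some (report, free_chairs)
termination_by room.toNat
decreasing_by all_goals (simp_all; omega)

def office_chairs_alt (current_rooms : Int) (current_chairs : List (String × String)) : String :=
  match officeChairsLoopB current_chairs current_rooms "" 0 with
  | none => ""   -- unreachable under Pre_: the Python raises here
  | some (report, free_chairs) =>
    if report ≠ "" then report
    else "Game On, " ++ PySem.Int.toStr free_chairs ++ " free chairs left"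

-- ===== PRECONDITION & SPEC =====
-- exactly the inputs on which the Python A returns: it visits the first current_rooms entries,
-- so it needs current_rooms ≤ len(current_chairs) and each visited second component to parse as int
def Pre_office_chairs (current_rooms : Int) (current_chairs : List (String × String)) : Prop :=
  current_rooms ≤ (current_chairs.length : Int) ∧
  ∀ p ∈ current_chairs.take current_rooms.toNat, (PySem.Int.ofStr? p.2).isSome = true
instance (current_rooms : Int) (current_chairs : List (String × String)) : Decidable (Pre_office_chairs current_rooms current_chairs) := by unfold Pre_office_chairs; infer_instance
def pvWitness_office_chairs : Int × (List (String × String)) := (2, [("ab", "1"), ("c", "3")])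

def Spec_office_chairs (current_rooms : Int) (current_chairs : List (String × String)) (out : String) : Prop := out = office_chairs_alt current_rooms current_chairs
instance (current_rooms : Int) (current_chairs : List (String × String)) (out : String) : Decidable (Spec_office_chairs current_rooms current_chairs out) := by unfold Spec_office_chairs; infer_instance

-- ===== CLAIM (what is proved, stated in full; the proofs are below) =====
def Claim_equal_office_chairs : Prop := ∀ (current_rooms : Int) (current_chairs : List (String × String)), Dom_office_chairs current_rooms current_chairs → Pre_office_chairs current_rooms current_chairs → Spec_office_chairs current_rooms current_chairs (office_chairs current_rooms current_chairs)

-- ===== LEMMAS AND PROOFS =====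

-- delta of row i (none exactly where the Python body raises)
def ocEntry? (cc : List (String × String)) (i : Int) : Option Int :=
  match PySem.List.pyGet? cc i with
  | none => none
  | some p => (PySem.Int.ofStr? p.2).map (fun w => PySem.Str.len p.1 - w)

def ocLine (d room : Int) : String :=
  PySem.Int.toStr d ++ " more chairs needed in room " ++ PySem.Int.toStr room

-- order-free description of one scan over rooms idx+1 .. idx+k (entries idx .. idx+k-1)
def ocScan (cc : List (String × String)) : Int → Nat → Option (List String × Int)
  | _, 0 => some ([], 0)
  | idx, (k+1) =>
    match ocEntry? cc idx, ocScan cc (idx+1) k with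
    | some d, some (l, f) =>
        some ((if d < 0 then [ocLine (-d) (idx+1)] else []) ++ l,
              (if d > 0 then d else 0) + f)
    | _, _ => none

-- B's prepending, as a fold
def ocGlue (l : List String) (r : String) : String :=
  l.foldr (fun a acc => if acc ≠ "" then a ++ "\n" ++ acc else a) r

theorem ocGlue_append (l₁ l₂ : List String) (r : String) :
    ocGlue (l₁ ++ l₂) r = ocGlue l₁ (ocGlue l₂ r) := by
  simp [ocGlue, List.foldr_append]

theorem ocLine_toList_ne_nil (d room : Int) : (ocLine d room).toList ≠ [] := by
  have h : (" more chairs needed in room ").toList ≠ [] := by decide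
  simp only [ocLine, String.toList_append]
  intro hcon
  rcases List.append_eq_nil_iff.mp hcon with ⟨h1, _⟩
  rcases List.append_eq_nil_iff.mp h1 with ⟨_, h2⟩
  exact h h2

theorem ocScan_lines (cc : List (String × String)) :
    ∀ (k : Nat) (idx : Int) (l : List String) (f : Int),
      ocScan cc idx k = some (l, f) → ∀ s ∈ l, s.toList ≠ [] := by
  intro k
  induction k with
  | zero => intro idx l f h s hs; simp [ocScan] at h; simp [h.1] at hs
  | succ k ih =>
    intro idx l f h s hs
    simp only [ocScan] at h
    cases he : ocEntry? cc idx with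
    | none => simp [he] at h
    | some d =>
      cases hr : ocScan cc (idx+1) k with
      | none => simp [he, hr] at h
      | some p =>
        obtain ⟨l', f'⟩ := p
        simp only [he, hr, Option.some.injEq, Prod.mk.injEq] at h
        obtain ⟨hl, _⟩ := h
        subst hl
        rcases List.mem_append.mp hs with hs' | hs'
        · by_cases hd : d < 0
          · rw [if_pos hd] at hs'
            simp only [List.mem_singleton] at hs'
            subst hs'; exact ocLine_toList_ne_nil _ _
          · rw [if_neg hd] at hs'; simp at hs'
        · exact ih (idx+1) l' f' hr s hs'

theorem ocJoin_cons_cons (a b : String) (t : List String) :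
    PySem.Str.join "\n" (a :: b :: t) = a ++ "\n" ++ PySem.Str.join "\n" (b :: t) := by
  apply String.toList_inj.mp
  simp [PySem.Str.toList_join, String.toList_append, PySem.Chars.join_cons_cons]

theorem ocJoin_ne_empty (l : List String) (h : ∀ s ∈ l, s.toList ≠ []) (hne : l ≠ []) :
    PySem.Str.join "\n" l ≠ "" := by
  intro hcon
  have hcon' : (PySem.Str.join "\n" l).toList = [] := by rw [hcon]; rfl
  cases l with
  | nil => exact hne rfl
  | cons a t =>
    cases t with
    | nil =>
      rw [PySem.Str.toList_join] at hcon'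
      simp only [List.map_cons, List.map_nil, PySem.Chars.join_singleton] at hcon'
      exact h a (by simp) hcon'
    | cons b t' =>
      rw [ocJoin_cons_cons, String.toList_append, String.toList_append] at hcon'
      rcases List.append_eq_nil_iff.mp hcon' with ⟨h1, _⟩
      rcases List.append_eq_nil_iff.mp h1 with ⟨_, h2⟩
      exact absurd h2 (by decide)

theorem ocGlue_eq_join (l : List String) (h : ∀ s ∈ l, s.toList ≠ []) :
    ocGlue l "" = PySem.Str.join "\n" l := by
  induction l with
  | nil => simp [ocGlue, PySem.Str.join, PySem.Chars.join_nil]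
  | cons a t ih =>
    cases t with
    | nil =>
      simp only [ocGlue, List.foldr]
      rw [if_neg (by simp)]
      apply String.toList_inj.mp
      simp [PySem.Str.toList_join, PySem.Chars.join_singleton]
    | cons b t' =>
      have ht : ∀ s ∈ b :: t', s.toList ≠ [] := fun s hs => h s (by simp [hs])
      have ihg : ocGlue (b :: t') "" = PySem.Str.join "\n" (b :: t') :=
        ih ht
      have hne : PySem.Str.join "\n" (b :: t') ≠ "" :=
        ocJoin_ne_empty _ ht (by simp)
      show (if ocGlue (b :: t') "" ≠ "" then a ++ "\n" ++ ocGlue (b :: t') "" else a) =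
        PySem.Str.join "\n" (a :: b :: t')
      rw [ihg, if_pos hne, ocJoin_cons_cons]

-- A's loop computes the scan forward
theorem loopA_eq (cc : List (String × String)) :
    ∀ (k : Nat) (idx free : Int) (res : List String),
    officeChairsLoopA cc (PySem.List.pyRange (idx + 1) (idx + 1 + k) 1) free res idx =
      match ocScan cc idx k with
      | none => none
      | some (l, f) => some (free + f, res ++ l, idx + k) := by
  intro k
  induction k with
  | zero =>
    intro idx free res
    rw [PySem.List.pyRange_one_eq_nil (by omega)]
    simp [officeChairsLoopA, ocScan]
  | succ k ih =>
    intro idx free res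
    rw [PySem.List.pyRange_one_cons (by omega : idx + 1 < idx + 1 + (k + 1 : Nat))]
    have h2 : idx + 1 + ((k + 1 : Nat) : Int) = (idx + 1) + 1 + (k : Nat) := by push_cast; ring
    rw [h2]
    simp only [officeChairsLoopA, ocScan, ocEntry?]
    cases hg : PySem.List.pyGet? cc idx with
    | none => simp
    | some pair =>
      cases hp : PySem.Int.ofStr? pair.2 with
      | none => simp [hp]
      | some needed =>
        simp only [hp, Option.map_some, ih]
        cases hds : ocScan cc (idx + 1) k with
        | none => split_ifs <;> rfl
        | some p =>
          obtain ⟨l, f⟩ := p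
          split_ifs with hgt hlt
          · -- count > needed: delta > 0
            simp only [Option.some.injEq, Prod.mk.injEq]
            refine ⟨by rw [if_pos (by omega)]; omega,
                    by rw [if_neg (by omega : ¬ (PySem.Str.len pair.1 - needed < 0))]; simp,
                    by push_cast; ring⟩
          · -- count < needed: delta < 0
            simp only [Option.some.injEq, Prod.mk.injEq]
            refine ⟨by rw [if_neg (by omega)]; omega, ?_,
                    by push_cast; ring⟩
            rw [if_pos (by omega : PySem.Str.len pair.1 - needed < 0)]
            simp [ocLine, neg_sub, List.append_assoc]
          · -- delta = 0
            simp only [Option.some.injEq, Prod.mk.injEq]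
            refine ⟨by rw [if_neg (by omega)]; omega,
                    by rw [if_neg (by omega : ¬ (PySem.Str.len pair.1 - needed < 0))]; simp,
                    by push_cast; ring⟩

-- snoc characterisation of the scan: peel the LAST entry
theorem ocScan_succ (cc : List (String × String)) :
    ∀ (k : Nat) (idx : Int),
    ocScan cc idx (k + 1) =
      match ocScan cc idx k, ocEntry? cc (idx + k) with
      | some (l, f), some d =>
          some (l ++ (if d < 0 then [ocLine (-d) (idx + k + 1)] else []),
                f + (if d > 0 then d else 0))
      | _, _ => none := by
  intro k
  induction k with
  | zero =>
    intro idx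
    simp only [ocScan, Nat.cast_zero, add_zero]
    cases he : ocEntry? cc idx with
    | none => rfl
    | some d => simp
  | succ k ih =>
    intro idx
    have hc : idx + 1 + (k : Int) = idx + ((k + 1 : Nat) : Int) := by push_cast; ring
    conv_lhs => rw [ocScan]
    conv_rhs => rw [ocScan]
    rw [ih (idx + 1), hc]
    cases he : ocEntry? cc idx with
    | none => rfl
    | some d =>
      cases hr : ocScan cc (idx + 1) k with
      | none => rfl
      | some p =>
        obtain ⟨l, f⟩ := p
        cases hl : ocEntry? cc (idx + ((k + 1 : Nat) : Int)) with
        | none => rfl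
        | some d' =>
          simp only [Option.some.injEq, Prod.mk.injEq]
          constructor
          · rw [List.append_assoc]
          · omega

-- B's backward loop computes the scan of rooms 1..k, glued onto the carried report
theorem loopB_eq (cc : List (String × String)) :
    ∀ (k : Nat) (r : String) (free : Int),
    officeChairsLoopB cc (k : Int) r free =
      match ocScan cc 0 k with
      | none => none
      | some (l, f) => some (ocGlue l r, free + f) := by
  intro k
  induction k with
  | zero =>
    intro r free
    rw [officeChairsLoopB]
    simp [ocScan, ocGlue]
  | succ k ih =>
    intro r free
    rw [officeChairsLoopB, dif_pos (by push_cast; omega : (1:Int) ≤ ((k+1 : Nat) : Int))]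
    rw [ocScan_succ]
    have hidx : ((k + 1 : Nat) : Int) - 1 = ((k : Nat) : Int) := by push_cast; ring
    have hg0 : (0 : Int) + (k : Nat) = ((k+1 : Nat) : Int) - 1 := by push_cast; ring
    cases hg : PySem.List.pyGet? cc (((k+1 : Nat) : Int) - 1) with
    | none =>
      have hE : ocEntry? cc (0 + (k : Nat)) = none := by
        simp only [ocEntry?, hg0, hg]
      rw [hE]
      cases ocScan cc 0 k with
      | none => rfl
      | some p => obtain ⟨l, f⟩ := p; rfl
    | some pair =>
      cases hp : PySem.Int.ofStr? pair.2 with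
      | none =>
        have hE : ocEntry? cc (0 + (k : Nat)) = none := by
          simp only [ocEntry?, hg0, hg, hp, Option.map_none]
        rw [hE]
        cases ocScan cc 0 k with
        | none => simp [hp]
        | some p => obtain ⟨l, f⟩ := p; simp [hp]
      | some taken =>
        have hentv : ocEntry? cc (0 + (k : Nat)) = some (PySem.Str.len pair.1 - taken) := by
          simp only [ocEntry?, hg0, hg, hp, Option.map_some]
        rw [hentv]
        simp only [hp]
        have hroom : (0 : Int) + (k : Nat) + 1 = ((k + 1 : Nat) : Int) := by push_cast; ring
        by_cases hlt : PySem.Str.len pair.1 - taken < 0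
        · -- delta < 0: prepend the line
          rw [if_pos hlt, hidx, ih]
          cases hr : ocScan cc 0 k with
          | none => rfl
          | some p =>
            obtain ⟨l, f⟩ := p
            simp only [Option.some.injEq, Prod.mk.injEq]
            constructor
            · rw [if_pos hlt, ocGlue_append, hroom]
              rfl
            · rw [if_neg (by omega)]; omega
        · rw [if_neg hlt]
          by_cases hgt : PySem.Str.len pair.1 - taken > 0
          · -- delta > 0: add to free
            rw [if_pos hgt, hidx, ih]
            cases hr : ocScan cc 0 k with
            | none => rfl
            | some p =>
              obtain ⟨l, f⟩ := p
              simp only [Option.some.injEq, Prod.mk.injEq]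
              constructor
              · rw [if_neg hlt, List.append_nil]
              · rw [if_pos hgt]; omega
          · -- delta = 0
            rw [if_neg hgt, hidx, ih]
            cases hr : ocScan cc 0 k with
            | none => rfl
            | some p =>
              obtain ⟨l, f⟩ := p
              simp only [Option.some.injEq, Prod.mk.injEq]
              constructor
              · rw [if_neg hlt, List.append_nil]
              · rw [if_neg hgt]; omega

-- ===== VERDICT (by name: the statement is the Claim_ definition above) =====
theorem office_chairs_spec : Claim_equal_office_chairs := by
  intro n cc _ _
  show office_chairs n cc = office_chairs_alt n cc
  unfold office_chairs office_chairs_alt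
  by_cases hn : n ≤ 0
  · rw [PySem.List.pyRange_one_eq_nil (by omega : n + 1 ≤ 1)]
    rw [officeChairsLoopB, dif_neg (by omega)]
    simp [officeChairsLoopA]
  · obtain ⟨m, hm⟩ : ∃ m : Nat, n = (m : Int) := ⟨n.toNat, by omega⟩
    subst hm
    have keyA := loopA_eq cc m 0 0 []
    simp only [zero_add] at keyA
    rw [show ((m : Int) + 1) = 1 + (m : Int) by ring, keyA, loopB_eq cc m "" 0]
    cases hds : ocScan cc 0 m with
    | none => rfl
    | some p =>
      obtain ⟨l, f⟩ := p
      simp only [zero_add, List.nil_append]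
      have hlines := ocScan_lines cc m 0 l f hds
      cases l with
      | nil => simp [ocGlue]
      | cons a t =>
        have hj := ocGlue_eq_join (a :: t) hlines
        have hne := ocJoin_ne_empty (a :: t) hlines (by simp)
        rw [if_pos (by simp), hj, if_pos hne]
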